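-- pv_equiv track=rewrite | github.com/east-lee/Algorithm | BOJ/[BOJ]1780.종이의 개수.py | divide_board
-- ===== SOURCE A (Python) =====
-- def divide_board(board):
--   n = len(board)
--   n = n//3
--
--   board_list = []
--   for i in range(3):
--     for j in range(3):
--       copy_board = list([0]*n for _ in range(n))
--       start_i, end_i, start_j, end_j = n*i, n*i+n, n*j, n*j+n
--       s_i, s_j = 0, 0
--       for m in range(start_i,end_i):
--         for k in range(start_j, end_j):
--           copy_board[s_i][s_j] = board[m][k]
--           s_j += 1
--         s_i += 1
--         s_j = 0
--       board_list.append(copy_board)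
--   return board_list
-- ===== SOURCE B (Python) =====
-- def divide_board(board):
--     n = len(board) // 3
--     blocks = [[] for _ in range(9)]
--     for m in range(3 * n):
--         bi = m // n
--         row = board[m]
--         for j in range(3):
--             blocks[bi * 3 + j].append(row[j * n:(j + 1) * n])
--     return blocks
-- ===== Notes on version B (the rewrite author's own statement) =====
-- stated objective: simpler
-- what changed: Instead of A's nine independent double copy-loops (one n x n cell-by-cell indexed copy per block), B preallocates the 9 blocks and makes a single pass over the rows, appending each row's three n-wide column slices to block (m//n)*3+j.
import Mathlib
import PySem

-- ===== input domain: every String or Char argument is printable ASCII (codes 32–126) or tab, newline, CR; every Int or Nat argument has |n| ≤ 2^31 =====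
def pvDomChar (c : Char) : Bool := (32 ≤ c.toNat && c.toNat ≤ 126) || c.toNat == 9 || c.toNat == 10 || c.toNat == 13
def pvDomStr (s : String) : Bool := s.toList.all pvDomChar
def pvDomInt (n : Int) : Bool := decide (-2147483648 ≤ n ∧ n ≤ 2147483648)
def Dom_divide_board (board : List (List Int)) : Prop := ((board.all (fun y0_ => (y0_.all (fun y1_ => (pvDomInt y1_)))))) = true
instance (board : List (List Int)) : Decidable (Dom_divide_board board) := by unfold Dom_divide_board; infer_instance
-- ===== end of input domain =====

-- B replaces A's nine independent double copy-loops by one pass over the rows that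
-- distributes each row's three column slices into preallocated blocks (objective: simpler).

-- ===== PORT A =====
-- Literal port of A: n = len(board)//3; for each (i,j) of the 3×3 grid build an n×n zero
-- board and copy board[m][k] cell by cell, tracking the counters s_i, s_j as in the Python.
-- The state of the copy loops is (copy_board, s_i, s_j).  board[m][k] is in range exactly
-- under Pre_ (outside it Python raises IndexError), so List.getD is exact there.
-- range(start_i, end_i) with end_i - start_i = n is ported as List.range' start_i n.
def divide_board (board : List (List Int)) : List (List (List Int)) :=
  let n := board.length / 3
  (List.range 3).foldl (fun board_list i =>
    (List.range 3).foldl (fun board_list j =>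
      let copy_board : List (List Int) := List.replicate n (List.replicate n 0)
      let st := (List.range' (n*i) n).foldl (fun (st : List (List Int) × Nat × Nat) m =>
          let st2 := (List.range' (n*j) n).foldl (fun (st : List (List Int) × Nat × Nat) k =>
              (st.1.set st.2.1 ((st.1.getD st.2.1 []).set st.2.2 ((board.getD m []).getD k 0)),
               st.2.1, st.2.2 + 1)) st
          (st2.1, st2.2.1 + 1, 0)) (copy_board, 0, 0)
      board_list ++ [st.1]) board_list) []

-- ===== PORT B =====
-- Literal port of B (Source B): 9 preallocated empty blocks; one pass over the row indices
-- m < 3n appending the three n-wide slices of board[m] to blocks[(m//n)*3 + j].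
def divide_board_alt (board : List (List Int)) : List (List (List Int)) :=
  let n := board.length / 3
  (List.range (3*n)).foldl (fun blocks m =>
    let bi := m / n
    let row := board.getD m []
    (List.range 3).foldl (fun blocks j =>
      blocks.set (bi*3+j) ((blocks.getD (bi*3+j) []) ++
        [PySem.List.slice row (some ((j*n : Nat) : Int)) (some (((j+1)*n : Nat) : Int))]))
      blocks)
    (List.replicate 9 [])

-- ===== PRECONDITION & SPEC =====
-- Pre_ excludes exactly the inputs on which A raises IndexError: A reads board[m][k] for
-- all m, k < 3*(len(board)//3), so it returns normally iff every row among the first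
-- 3*(len//3) has length at least 3*(len//3).
def Pre_divide_board (board : List (List Int)) : Prop :=
  ∀ row ∈ board.take (3 * (board.length / 3)), 3 * (board.length / 3) ≤ row.length
instance (board : List (List Int)) : Decidable (Pre_divide_board board) := by
  unfold Pre_divide_board; infer_instance
def pvWitness_divide_board : List (List Int) :=
  [[1,2,3],[4,5,6],[7,8,9]]

def Spec_divide_board (board : List (List Int)) (out : List (List (List Int))) : Prop := out = divide_board_alt board
instance (board : List (List Int)) (out : List (List (List Int))) : Decidable (Spec_divide_board board out) := by unfold Spec_divide_board; infer_instance

-- ===== CLAIM (what is proved, stated in full; the proofs are below) =====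
def Claim_equal_divide_board : Prop := ∀ (board : List (List Int)), Dom_divide_board board → Pre_divide_board board → Spec_divide_board board (divide_board board)

-- ===== LEMMAS AND PROOFS =====

-- the (i,j) block both programs produce: rows n*i..n*i+n-1, columns n*j..n*j+n-1
def pvBlock (board : List (List Int)) (n i j : Nat) : List (List Int) :=
  (List.range n).map (fun a => (List.range n).map (fun b =>
    ((board.getD (n*i+a) []).getD (n*j+b) 0)))

-- A's inner copy loop: writes row s_i of copy_board cell by cell
theorem pvA_inner (g : Nat → Int) :
    ∀ (t : Nat) (cb : List (List Int)) (a s k0 : Nat), a < cb.length →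
    (List.range' k0 t).foldl (fun (st : List (List Int) × Nat × Nat) k =>
        (st.1.set st.2.1 ((st.1.getD st.2.1 []).set st.2.2 (g k)), st.2.1, st.2.2 + 1)) (cb, a, s)
    = (cb.set a ((List.range t).foldl (fun r b => r.set (s+b) (g (k0+b))) (cb.getD a [])), a, s+t) := by
  intro t
  induction t with
  | zero => intro cb a s k0 ha; simp [List.getElem?_eq_getElem ha]
  | succ t ih =>
    intro cb a s k0 ha
    rw [List.range'_succ, List.foldl_cons]
    have ha' : a < (cb.set a ((cb.getD a []).set s (g k0))).length := by simpa using ha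
    rw [ih _ a (s+1) (k0+1) ha']
    rw [List.set_set]
    have hget : (cb.set a ((cb.getD a []).set s (g k0))).getD a [] = (cb.getD a []).set s (g k0) := by
      simp [List.getD_eq_getElem?_getD, ha]
    rw [hget]
    rw [List.range_succ_eq_map, List.foldl_cons, List.foldl_map]
    have hfun : (fun (x : List Int) (y : Nat) => x.set (s + 1 + y) (g (k0 + 1 + y)))
        = (fun (x : List Int) (y : Nat) => x.set (s + y.succ) (g (k0 + y.succ))) := by
      funext x y
      rw [show s + 1 + y = s + y.succ from by omega, show k0 + 1 + y = k0 + y.succ from by omega]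
    rw [hfun]
    simp only [Nat.add_zero]
    congr 2
    omega

-- writing every cell of a zero row yields the mapped row
theorem pvRowFill (g : Nat → Int) :
    ∀ (t n : Nat), t ≤ n →
    (List.range t).foldl (fun (r : List Int) b => r.set b (g b)) (List.replicate n 0)
    = (List.range t).map g ++ List.replicate (n - t) 0 := by
  intro t
  induction t with
  | zero => intro n _; simp
  | succ t ih =>
    intro n ht
    rw [List.range_succ, List.foldl_append, List.foldl_cons, List.foldl_nil, ih n (by omega)]
    rw [List.set_append, List.map_append]
    simp only [List.length_map, List.length_range, Nat.lt_irrefl, Nat.sub_self]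
    have hrep : List.replicate (n - t) (0:Int) = 0 :: List.replicate (n - (t+1)) 0 := by
      rw [show n - t = (n - (t+1)) + 1 from by omega]; rfl
    rw [hrep]
    simp

-- A's outer loop body (definitionally the step function inside divide_board)
def pvOStep (board : List (List Int)) (n j : Nat)
    (st : List (List Int) × Nat × Nat) (m : Nat) : List (List Int) × Nat × Nat :=
  let st2 := (List.range' (n*j) n).foldl (fun (st : List (List Int) × Nat × Nat) k =>
      (st.1.set st.2.1 ((st.1.getD st.2.1 []).set st.2.2 ((board.getD m []).getD k 0)),
       st.2.1, st.2.2 + 1)) st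
  (st2.1, st2.2.1 + 1, 0)

theorem pvA_outer (board : List (List Int)) (n j : Nat) :
    ∀ (t : Nat) (done : List (List Int)) (m0 : Nat), done.length + t ≤ n →
    (List.range' m0 t).foldl (pvOStep board n j)
      (done ++ List.replicate (n - done.length) (List.replicate n 0), done.length, 0)
    = (done
        ++ (List.range' m0 t).map (fun m => (List.range n).map (fun b => (board.getD m []).getD (n*j+b) 0))
        ++ List.replicate (n - done.length - t) (List.replicate n 0), done.length + t, 0) := by
  intro t
  induction t with
  | zero => intro done m0 _; simp
  | succ t ih =>
    intro done m0 ht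
    have ha : done.length < n := by omega
    have hgetA : (done ++ List.replicate (n - done.length) (List.replicate n (0:Int))).getD done.length [] = List.replicate n (0:Int) := by
      simp [List.getD_eq_getElem?_getD, ha]
    rw [List.range'_succ, List.foldl_cons]
    have h1 : pvOStep board n j
        (done ++ List.replicate (n - done.length) (List.replicate n 0), done.length, 0) m0
        = ((done ++ [(List.range n).map (fun b => (board.getD m0 []).getD (n*j+b) 0)])
            ++ List.replicate (n - (done.length + 1)) (List.replicate n 0), done.length + 1, 0) := by
      unfold pvOStep
      rw [pvA_inner _ n _ done.length 0 (n*j) (by simp; omega)]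
      rw [hgetA]
      have hfun : (fun (r : List Int) (b : Nat) => r.set (0+b) ((board.getD m0 []).getD (n*j+b) 0))
          = (fun (r : List Int) (b : Nat) => r.set b ((fun b => (board.getD m0 []).getD (n*j+b) 0) b)) := by
        funext r b; rw [Nat.zero_add]
      rw [hfun, pvRowFill _ n n (le_refl n)]
      simp only [Nat.sub_self, List.replicate_zero, List.append_nil]
      rw [List.set_append, if_neg (Nat.lt_irrefl _), Nat.sub_self]
      rw [show n - done.length = (n - (done.length+1)) + 1 from by omega, List.replicate_succ,
        List.set_cons_zero]
      simp
    rw [h1]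
    have hlen1 : (done ++ [(List.range n).map (fun b => (board.getD m0 []).getD (n*j+b) 0)]).length = done.length + 1 := by simp
    have hrec := ih (done ++ [(List.range n).map (fun b => (board.getD m0 []).getD (n*j+b) 0)]) (m0+1) (by simp; omega)
    rw [hlen1] at hrec
    rw [hrec]
    simp [List.append_assoc, show n - (done.length+1) - t = n - done.length - (t+1) from by omega,
      show done.length+1+t = done.length+(t+1) from by omega]

-- one full (i,j) copy loop of A yields pvBlock
theorem pvT_eq (board : List (List Int)) (n i j : Nat) :
    ((List.range' (n*i) n).foldl (pvOStep board n j)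
      (List.replicate n (List.replicate n 0), 0, 0)).1 = pvBlock board n i j := by
  have h := pvA_outer board n j n [] (n*i) (by simp)
  simp only [List.length_nil, Nat.sub_zero, List.nil_append, Nat.zero_add] at h
  rw [h]
  simp [pvBlock, List.range'_eq_map_range, List.map_map, Function.comp_def]

theorem pvA_closed (board : List (List Int)) :
    divide_board board =
      [pvBlock board (board.length/3) 0 0, pvBlock board (board.length/3) 0 1, pvBlock board (board.length/3) 0 2,
       pvBlock board (board.length/3) 1 0, pvBlock board (board.length/3) 1 1, pvBlock board (board.length/3) 1 2,
       pvBlock board (board.length/3) 2 0, pvBlock board (board.length/3) 2 1, pvBlock board (board.length/3) 2 2] := by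
  have hA : divide_board board =
      [((List.range' ((board.length/3)*0) (board.length/3)).foldl (pvOStep board (board.length/3) 0) (List.replicate (board.length/3) (List.replicate (board.length/3) 0), 0, 0)).1,
       ((List.range' ((board.length/3)*0) (board.length/3)).foldl (pvOStep board (board.length/3) 1) (List.replicate (board.length/3) (List.replicate (board.length/3) 0), 0, 0)).1,
       ((List.range' ((board.length/3)*0) (board.length/3)).foldl (pvOStep board (board.length/3) 2) (List.replicate (board.length/3) (List.replicate (board.length/3) 0), 0, 0)).1,
       ((List.range' ((board.length/3)*1) (board.length/3)).foldl (pvOStep board (board.length/3) 0) (List.replicate (board.length/3) (List.replicate (board.length/3) 0), 0, 0)).1,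
       ((List.range' ((board.length/3)*1) (board.length/3)).foldl (pvOStep board (board.length/3) 1) (List.replicate (board.length/3) (List.replicate (board.length/3) 0), 0, 0)).1,
       ((List.range' ((board.length/3)*1) (board.length/3)).foldl (pvOStep board (board.length/3) 2) (List.replicate (board.length/3) (List.replicate (board.length/3) 0), 0, 0)).1,
       ((List.range' ((board.length/3)*2) (board.length/3)).foldl (pvOStep board (board.length/3) 0) (List.replicate (board.length/3) (List.replicate (board.length/3) 0), 0, 0)).1,
       ((List.range' ((board.length/3)*2) (board.length/3)).foldl (pvOStep board (board.length/3) 1) (List.replicate (board.length/3) (List.replicate (board.length/3) 0), 0, 0)).1,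
       ((List.range' ((board.length/3)*2) (board.length/3)).foldl (pvOStep board (board.length/3) 2) (List.replicate (board.length/3) (List.replicate (board.length/3) 0), 0, 0)).1] := rfl
  rw [hA]
  simp only [pvT_eq]

-- B's loop body (definitionally the step function inside divide_board_alt)
def pvBStep (board : List (List Int)) (n : Nat)
    (blocks : List (List (List Int))) (m : Nat) : List (List (List Int)) :=
  let bi := m / n
  let row := board.getD m []
  (List.range 3).foldl (fun blocks j =>
    blocks.set (bi*3+j) ((blocks.getD (bi*3+j) []) ++
      [PySem.List.slice row (some ((j*n : Nat) : Int)) (some (((j+1)*n : Nat) : Int))]))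
    blocks

-- the j-th n-wide slice of row m
def pvSl (board : List (List Int)) (n j : Nat) (m : Nat) : List Int :=
  PySem.List.slice (board.getD m []) (some ((j*n : Nat) : Int)) (some (((j+1)*n : Nat) : Int))

theorem pvB_unfold (board : List (List Int)) :
    divide_board_alt board
      = (List.range (3*(board.length/3))).foldl (pvBStep board (board.length/3)) (List.replicate 9 []) := rfl

theorem pvBStep_eval0 (board : List (List Int)) (n m : Nat) (h : m / n = 0)
    (b0 b1 b2 b3 b4 b5 b6 b7 b8 : List (List Int)) :
    pvBStep board n [b0,b1,b2,b3,b4,b5,b6,b7,b8] m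
      = [b0 ++ [pvSl board n 0 m], b1 ++ [pvSl board n 1 m], b2 ++ [pvSl board n 2 m],
         b3,b4,b5,b6,b7,b8] := by
  unfold pvBStep pvSl
  rw [h]
  rfl

theorem pvBStep_eval1 (board : List (List Int)) (n m : Nat) (h : m / n = 1)
    (b0 b1 b2 b3 b4 b5 b6 b7 b8 : List (List Int)) :
    pvBStep board n [b0,b1,b2,b3,b4,b5,b6,b7,b8] m
      = [b0,b1,b2, b3 ++ [pvSl board n 0 m], b4 ++ [pvSl board n 1 m], b5 ++ [pvSl board n 2 m],
         b6,b7,b8] := by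
  unfold pvBStep pvSl
  rw [h]
  rfl

theorem pvBStep_eval2 (board : List (List Int)) (n m : Nat) (h : m / n = 2)
    (b0 b1 b2 b3 b4 b5 b6 b7 b8 : List (List Int)) :
    pvBStep board n [b0,b1,b2,b3,b4,b5,b6,b7,b8] m
      = [b0,b1,b2,b3,b4,b5, b6 ++ [pvSl board n 0 m], b7 ++ [pvSl board n 1 m], b8 ++ [pvSl board n 2 m]] := by
  unfold pvBStep pvSl
  rw [h]
  rfl

theorem pvBSeg0 (board : List (List Int)) (n : Nat) :
    ∀ (t m0 : Nat) (b0 b1 b2 b3 b4 b5 b6 b7 b8 : List (List Int)),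
    (∀ m ∈ List.range' m0 t, m / n = 0) →
    (List.range' m0 t).foldl (pvBStep board n) [b0,b1,b2,b3,b4,b5,b6,b7,b8]
      = [b0 ++ (List.range' m0 t).map (pvSl board n 0), b1 ++ (List.range' m0 t).map (pvSl board n 1),
         b2 ++ (List.range' m0 t).map (pvSl board n 2), b3,b4,b5,b6,b7,b8] := by
  intro t
  induction t with
  | zero => intro m0 b0 b1 b2 b3 b4 b5 b6 b7 b8 _; simp
  | succ t ih =>
    intro m0 b0 b1 b2 b3 b4 b5 b6 b7 b8 h
    rw [List.range'_succ, List.foldl_cons,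
      pvBStep_eval0 board n m0 (h m0 (by simp [List.range'_succ])),
      ih (m0+1) _ _ _ _ _ _ _ _ _ (fun m hm => h m (by simp [List.range'_succ, hm]))]
    simp [List.append_assoc]

theorem pvBSeg1 (board : List (List Int)) (n : Nat) :
    ∀ (t m0 : Nat) (b0 b1 b2 b3 b4 b5 b6 b7 b8 : List (List Int)),
    (∀ m ∈ List.range' m0 t, m / n = 1) →
    (List.range' m0 t).foldl (pvBStep board n) [b0,b1,b2,b3,b4,b5,b6,b7,b8]
      = [b0,b1,b2, b3 ++ (List.range' m0 t).map (pvSl board n 0), b4 ++ (List.range' m0 t).map (pvSl board n 1),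
         b5 ++ (List.range' m0 t).map (pvSl board n 2), b6,b7,b8] := by
  intro t
  induction t with
  | zero => intro m0 b0 b1 b2 b3 b4 b5 b6 b7 b8 _; simp
  | succ t ih =>
    intro m0 b0 b1 b2 b3 b4 b5 b6 b7 b8 h
    rw [List.range'_succ, List.foldl_cons,
      pvBStep_eval1 board n m0 (h m0 (by simp [List.range'_succ])),
      ih (m0+1) _ _ _ _ _ _ _ _ _ (fun m hm => h m (by simp [List.range'_succ, hm]))]
    simp [List.append_assoc]

theorem pvBSeg2 (board : List (List Int)) (n : Nat) :
    ∀ (t m0 : Nat) (b0 b1 b2 b3 b4 b5 b6 b7 b8 : List (List Int)),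
    (∀ m ∈ List.range' m0 t, m / n = 2) →
    (List.range' m0 t).foldl (pvBStep board n) [b0,b1,b2,b3,b4,b5,b6,b7,b8]
      = [b0,b1,b2,b3,b4,b5, b6 ++ (List.range' m0 t).map (pvSl board n 0), b7 ++ (List.range' m0 t).map (pvSl board n 1),
         b8 ++ (List.range' m0 t).map (pvSl board n 2)] := by
  intro t
  induction t with
  | zero => intro m0 b0 b1 b2 b3 b4 b5 b6 b7 b8 _; simp
  | succ t ih =>
    intro m0 b0 b1 b2 b3 b4 b5 b6 b7 b8 h
    rw [List.range'_succ, List.foldl_cons,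
      pvBStep_eval2 board n m0 (h m0 (by simp [List.range'_succ])),
      ih (m0+1) _ _ _ _ _ _ _ _ _ (fun m hm => h m (by simp [List.range'_succ, hm]))]
    simp [List.append_assoc]

theorem pvB_closed (board : List (List Int)) :
    divide_board_alt board
      = [(List.range' ((board.length/3)*0) (board.length/3)).map (pvSl board (board.length/3) 0),
         (List.range' ((board.length/3)*0) (board.length/3)).map (pvSl board (board.length/3) 1),
         (List.range' ((board.length/3)*0) (board.length/3)).map (pvSl board (board.length/3) 2),
         (List.range' ((board.length/3)*1) (board.length/3)).map (pvSl board (board.length/3) 0),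
         (List.range' ((board.length/3)*1) (board.length/3)).map (pvSl board (board.length/3) 1),
         (List.range' ((board.length/3)*1) (board.length/3)).map (pvSl board (board.length/3) 2),
         (List.range' ((board.length/3)*2) (board.length/3)).map (pvSl board (board.length/3) 0),
         (List.range' ((board.length/3)*2) (board.length/3)).map (pvSl board (board.length/3) 1),
         (List.range' ((board.length/3)*2) (board.length/3)).map (pvSl board (board.length/3) 2)] := by
  set n := board.length / 3 with hnd
  rw [pvB_unfold, ← hnd]
  have hsplit : List.range (3*n) = List.range' (n*0) n ++ List.range' (n*1) n ++ List.range' (n*2) n := by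
    rw [List.range_eq_range']
    have h1 : List.range' n n ++ List.range' (n + 1*n) n = List.range' n (n+n) := List.range'_append
    have h2 : List.range' 0 n ++ List.range' (0 + 1*n) (n+n) = List.range' 0 (n+(n+n)) := List.range'_append
    simp only [Nat.one_mul, Nat.zero_add] at h1 h2
    rw [show 3*n = n+(n+n) from by ring, ← h2, ← h1,
      show n*0 = 0 from by ring, show n*1 = n from by ring, show n*2 = n+n from by ring]
    simp [List.append_assoc]
  rw [hsplit, List.foldl_append, List.foldl_append]
  rw [show (List.replicate 9 ([] : List (List Int))) = [[],[],[],[],[],[],[],[],[]] from rfl]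
  rw [pvBSeg0 board n n (n*0) _ _ _ _ _ _ _ _ _ (by
    intro m hm; rw [List.mem_range'_1] at hm; exact Nat.div_eq_of_lt (by omega))]
  rw [pvBSeg1 board n n (n*1) _ _ _ _ _ _ _ _ _ (by
    intro m hm; rw [List.mem_range'_1] at hm
    exact Nat.div_eq_of_lt_le (by omega) (by omega))]
  rw [pvBSeg2 board n n (n*2) _ _ _ _ _ _ _ _ _ (by
    intro m hm; rw [List.mem_range'_1] at hm
    exact Nat.div_eq_of_lt_le (by omega) (by omega))]
  simp

-- under Pre_, the list of j-th slices of block-i rows is pvBlock i j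
theorem pvEntry (board : List (List Int)) (hPre : Pre_divide_board board)
    (i j : Nat) (hi : i < 3) (hj : j < 3) :
    (List.range' ((board.length/3)*i) (board.length/3)).map (pvSl board (board.length/3) j)
      = pvBlock board (board.length/3) i j := by
  set n := board.length / 3 with hnd
  have h3n : 3*n ≤ board.length := by
    have := Nat.div_mul_le_self board.length 3
    omega
  rw [show n*i = n*i from rfl]
  unfold pvBlock
  rw [List.range'_eq_map_range, List.map_map]
  apply List.map_congr_left
  intro a ha
  rw [List.mem_range] at ha
  simp only [Function.comp_apply]
  have hmlt : n*i + a < 3*n := by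
    have : n*i ≤ n*2 := Nat.mul_le_mul_left n (by omega)
    omega
  have hmlen : n*i + a < board.length := by omega
  have hrowlen : 3*n ≤ (board.getD (n*i+a) []).length := by
    apply hPre
    have hgetT : (board.take (3*n))[n*i+a]'(by simp; omega) = board.getD (n*i+a) [] := by
      rw [List.getElem_take, List.getD_eq_getElem _ _ hmlen]
    rw [← hgetT]
    exact List.getElem_mem _
  unfold pvSl
  have hcast : (((j+1)*n : Nat) : Int) = ((j*n : Nat) : Int) + (n : Int) := by push_cast; ring
  rw [hcast, PySem.List.slice_natCast_add]
  have hjn : j*n + n ≤ 3*n := by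
    have : j*n ≤ 2*n := Nat.mul_le_mul_right n (by omega)
    omega
  apply List.ext_getElem
  · rw [List.length_take, List.length_drop, List.length_map, List.length_range]
    omega
  · intro b hb1 hb2
    have hidx : j*n + b = n*j + b := by ring
    simp only [List.getElem_take, List.getElem_drop, List.getElem_map, List.getElem_range, hidx,
      List.getD_eq_getElem?_getD]
    have hrowlen' : 3*n ≤ (board[n*i+a]?.getD []).length := by
      simpa [List.getD_eq_getElem?_getD] using hrowlen
    have hb : b < n := by simpa using hb2
    have e : n*j = j*n := Nat.mul_comm n j
    rw [List.getElem?_eq_getElem (show n*j + b < (board[n*i+a]?.getD []).length from by omega)]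
    rfl

-- ===== VERDICT (by name: the statement is the Claim_ definition above) =====
theorem divide_board_spec : Claim_equal_divide_board := by
  intro board _ hPre
  unfold Spec_divide_board
  rw [pvA_closed]
  by_cases h0 : board.length / 3 = 0
  · rw [pvB_unfold, h0]
    simp [pvBlock]
  · rw [pvB_closed board,
      pvEntry board hPre 0 0 (by omega) (by omega), pvEntry board hPre 0 1 (by omega) (by omega),
      pvEntry board hPre 0 2 (by omega) (by omega), pvEntry board hPre 1 0 (by omega) (by omega),
      pvEntry board hPre 1 1 (by omega) (by omega), pvEntry board hPre 1 2 (by omega) (by omega),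
      pvEntry board hPre 2 0 (by omega) (by omega), pvEntry board hPre 2 1 (by omega) (by omega),
      pvEntry board hPre 2 2 (by omega) (by omega)]
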